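-- pv_equiv track=rewrite | github.com/aydinmervee/sudoku | sudoku/views.py | convert_1d_to_2d
-- ===== SOURCE A (Python) =====
-- def convert_1d_to_2d(string, size):
--     sudoku_game = []
--     row = []
--
--     string = string[1:-1]
--     string = string.replace("'", "")
--     items = string.split(', ')
--
--     i = 1
--     for item in items:
--         temp_item = item
--         try:
--             item = int(temp_item)
--         except Exception:
--             pass
--
--         row.append(item)
--         if i % size == 0:
--             sudoku_game.append(row)
--             row = []
--         i += 1
--
--     return sudoku_game
-- ===== SOURCE B (Python) =====
-- def convert_1d_to_2d(string, size):
--     # Phase 1: parse every token into one flat list.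
--     s = string[1:-1].replace("'", "")
--     vals = []
--     for t in s.split(', '):
--         try:
--             vals.append(int(t))
--         except ValueError:
--             vals.append(t)
--     # Phase 2: build the rows by slicing off full chunks.
--     n = len(vals)
--     return [vals[i:i + size] for i in range(0, n - n % size, size)]
-- ===== Notes on version B (the rewrite author's own statement) =====
-- stated objective: alternative
-- what changed: A interleaves parsing and row-building in one counter-driven loop that flushes a row whenever i % size == 0; B first parses the whole string into one flat value list, then assembles the rows in a second phase as slices vals[i:i+size] for i in range(0, n - n % size, size), which drops the partial tail.
-- intended difference: For negative size with at least |size| parsed tokens, A accidentally groups the values into rows of |size| (Python's i % size == 0 fires at multiples of |size|), while B returns [], the intended result for a nonsensical negative row size (an empty step-size range). — e.g. on convert_1d_to_2d("[1, 2]", -2): A returns [[1, 2]], B returns []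
-- outside the precondition, e.g. on convert_1d_to_2d('[1, x]', 1): A returns [[1], ['x']], B returns [[1], ['x']]; on convert_1d_to_2d('ab', -1): A returns [['']], B returns []
import Mathlib
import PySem

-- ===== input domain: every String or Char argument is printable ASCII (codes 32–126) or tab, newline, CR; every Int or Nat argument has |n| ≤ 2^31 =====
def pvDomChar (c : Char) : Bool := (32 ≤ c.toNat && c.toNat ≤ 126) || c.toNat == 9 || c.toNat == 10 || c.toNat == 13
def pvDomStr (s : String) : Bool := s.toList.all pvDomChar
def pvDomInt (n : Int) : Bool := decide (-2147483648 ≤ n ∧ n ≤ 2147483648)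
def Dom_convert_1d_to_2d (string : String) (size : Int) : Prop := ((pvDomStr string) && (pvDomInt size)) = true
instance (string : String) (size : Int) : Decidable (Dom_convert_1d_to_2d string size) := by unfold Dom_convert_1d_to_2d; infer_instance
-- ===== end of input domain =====

-- B parses the whole string into one flat token list, then builds the rows in a second
-- phase as range-stepped slices (alternative decomposition, not faster); on negative size
-- B returns [] where A accidentally chunks by |size| (stated as the intended difference D_).


-- ===== PORT A =====
-- `item = int(temp_item)` with `except: pass` is ported as an Option Int: some = the parsed
-- int, none = the raw string kept by the except branch. A none in the result is not
-- representable in List (List Int) (Pre_ excludes those inputs); the final map (·.getD 0)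
-- converts the representation. `string.split(', ')` has a nonempty separator, which never
-- raises, so `(PySem.Str.split? … ", ").getD []` is exact.
-- shared first phase of both ports (and the parser Pre_/D_ inspect the input through):
-- string[1:-1].replace("'", "").split(', ')
def pvToksPre (string : String) : List String :=
  (PySem.Str.split? (PySem.Str.replace (PySem.Str.slice string (some 1) (some (-1))) "'" "") ", ").getD []

def convert_1d_to_2d (string : String) (size : Int) : List (List Int) :=
  let items := pvToksPre string                                -- string[1:-1].replace("'", "").split(', ')
  let fin := items.foldl
    (fun (st : List (List (Option Int)) × List (Option Int) × Int) (item : String) =>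
      if PySem.Int.mod st.2.2 size = 0                         -- if i % size == 0
      then (st.1 ++ [st.2.1 ++ [PySem.Int.ofStr? item]], ([] : List (Option Int)), st.2.2 + 1)
      else (st.1, st.2.1 ++ [PySem.Int.ofStr? item], st.2.2 + 1))
    ([], [], (1 : Int))
  fin.1.map (fun r => r.map (fun v => v.getD 0))

-- ===== PORT B =====
-- Source B phase 1: the flat parsed list (same Option Int representation as A's port);
-- phase 2: `[vals[i:i+size] for i in range(0, n - n % size, size)]`.
def convert_1d_to_2d_alt (string : String) (size : Int) : List (List Int) :=
  let toks := pvToksPre string                                 -- string[1:-1].replace("'", "").split(', ')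
  let vals := toks.map PySem.Int.ofStr?                        -- phase 1: flat parsed list
  let n : Int := (vals.length : Int)
  ((PySem.List.pyRange 0 (n - PySem.Int.mod n size) size).map
      (fun i => PySem.List.slice vals (some i) (some (i + size)))).map
    (fun r => r.map (fun v => v.getD 0))

-- ===== PRECONDITION & SPEC =====
-- Pre_ excludes size == 0, where A raises ZeroDivisionError (and B raises too), and inputs
-- where some token kept in the output does not parse as an int: there A returns rows that
-- contain strings, which is not a value of the declared List (List Int) type.
def Pre_convert_1d_to_2d (string : String) (size : Int) : Prop :=
  size ≠ 0 ∧
  ∀ t ∈ (pvToksPre string).take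
      ((pvToksPre string).length - (pvToksPre string).length % size.natAbs),
    (PySem.Int.ofStr? t).isSome = true
instance (string : String) (size : Int) : Decidable (Pre_convert_1d_to_2d string size) := by
  unfold Pre_convert_1d_to_2d; infer_instance

def pvWitness_convert_1d_to_2d : String × Int := ("[1, 2, 3, 4]", 2)

-- For negative size with at least |size| tokens, A accidentally groups the values into rows
-- of |size| (Python's i % size == 0 fires at multiples of |size|), while B returns [], the
-- intended result for a nonsensical negative row size (an empty step-size range).
def D_convert_1d_to_2d (string : String) (size : Int) : Prop :=
  size < 0 ∧ size.natAbs ≤ (pvToksPre string).length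
instance (string : String) (size : Int) : Decidable (D_convert_1d_to_2d string size) := by
  unfold D_convert_1d_to_2d; infer_instance

def Spec_convert_1d_to_2d (string : String) (size : Int) (out : List (List Int)) : Prop :=
  ¬ D_convert_1d_to_2d string size → out = convert_1d_to_2d_alt string size
instance (string : String) (size : Int) (out : List (List Int)) : Decidable (Spec_convert_1d_to_2d string size out) := by unfold Spec_convert_1d_to_2d; infer_instance

def pvDiffWitness_convert_1d_to_2d : String × Int := ("[1, 2]", -2)
def pvDiffWitnessOut_convert_1d_to_2d : (List (List Int)) × (List (List Int)) := ([[1, 2]], [])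

-- ===== CLAIM (what is proved, stated in full; the proofs are below) =====
def Claim_unchanged_convert_1d_to_2d : Prop := ∀ (string : String) (size : Int), Dom_convert_1d_to_2d string size → Pre_convert_1d_to_2d string size → Spec_convert_1d_to_2d string size (convert_1d_to_2d string size)
def Claim_changed_convert_1d_to_2d : Prop := Dom_convert_1d_to_2d (pvDiffWitness_convert_1d_to_2d.1) (pvDiffWitness_convert_1d_to_2d.2) ∧ Pre_convert_1d_to_2d (pvDiffWitness_convert_1d_to_2d.1) (pvDiffWitness_convert_1d_to_2d.2) ∧ D_convert_1d_to_2d (pvDiffWitness_convert_1d_to_2d.1) (pvDiffWitness_convert_1d_to_2d.2) ∧ convert_1d_to_2d (pvDiffWitness_convert_1d_to_2d.1) (pvDiffWitness_convert_1d_to_2d.2) = pvDiffWitnessOut_convert_1d_to_2d.1 ∧ convert_1d_to_2d_alt (pvDiffWitness_convert_1d_to_2d.1) (pvDiffWitness_convert_1d_to_2d.2) = pvDiffWitnessOut_convert_1d_to_2d.2 ∧ pvDiffWitnessOut_convert_1d_to_2d.1 ≠ pvDiffWitnessOut_convert_1d_to_2d.2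
def Claim_exact_convert_1d_to_2d : Prop := ∀ (string : String) (size : Int), Dom_convert_1d_to_2d string size → Pre_convert_1d_to_2d string size → D_convert_1d_to_2d string size → convert_1d_to_2d string size ≠ convert_1d_to_2d_alt string size

-- ===== LEMMAS AND PROOFS =====

-- rows of m consecutive values (the common shape both characterizations reach)
def chunkRows {α : Type} (m : Nat) : List α → List (List α)
  | [] => []
  | x :: xs => (x :: xs.take (m - 1)) :: chunkRows m (xs.drop (m - 1))
termination_by l => l.length
decreasing_by simp

theorem chunkRows_cons {α : Type} (m : Nat) (hm : 0 < m) (l : List α) (h : l ≠ []) :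
    chunkRows m l = l.take m :: chunkRows m (l.drop m) := by
  cases l with
  | nil => exact absurd rfl h
  | cons x xs =>
    rw [chunkRows]
    obtain ⟨m', rfl⟩ : ∃ m', m = m' + 1 := ⟨m - 1, by omega⟩
    simp

theorem flush_iff (size : Int) (m c r : Nat) (hm : size.natAbs = m) (h1 : r + 1 ≤ m) :
    (PySem.Int.mod ((c * m + r + 1 : Nat) : Int) size = 0) ↔ r + 1 = m := by
  rw [PySem.Int.mod_eq_zero_iff_dvd, ← Int.natAbs_dvd, hm, Int.natCast_dvd_natCast]
  have hmm : c * m + r + 1 = c * m + (r + 1) := by omega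
  rw [hmm]
  constructor
  · intro hd
    have h2 : m ∣ r + 1 := (Nat.dvd_add_right (Dvd.intro c (mul_comm m c))).mp hd
    have := Nat.le_of_dvd (by omega) h2
    omega
  · intro h
    obtain rfl : m = r + 1 := h.symm
    exact ⟨c + 1, by ring⟩

-- A's loop, characterized: the accumulated grid plus chunks of the multiple-of-m prefix
theorem loopA (size : Int) (m : Nat) (hm : size.natAbs = m) (hm0 : 0 < m) :
    ∀ (vals : List (Option Int)) (g : List (List (Option Int)))
      (r : List (Option Int)) (c : Nat), r.length < m →
    (vals.foldl
      (fun (st : List (List (Option Int)) × List (Option Int) × Int) (v : Option Int) =>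
        if PySem.Int.mod st.2.2 size = 0
        then (st.1 ++ [st.2.1 ++ [v]], ([] : List (Option Int)), st.2.2 + 1)
        else (st.1, st.2.1 ++ [v], st.2.2 + 1))
      (g, r, ((c * m + r.length + 1 : Nat) : Int))).1
      = g ++ chunkRows m ((r ++ vals).take ((r ++ vals).length - (r ++ vals).length % m)) := by
  intro vals
  induction vals with
  | nil =>
    intro g r c hr
    simp [List.foldl]
    have : r.length % m = r.length := Nat.mod_eq_of_lt hr
    simp [this, chunkRows]
  | cons v vs ih =>
    intro g r c hr
    rw [List.foldl_cons]
    by_cases hfl : r.length + 1 = m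
    · -- flush: the row is full, A appends it and resets
      have hcond : PySem.Int.mod ((c * m + r.length + 1 : Nat) : Int) size = 0 :=
        (flush_iff size m c r.length hm (by omega)).mpr hfl
      rw [if_pos hcond]
      have hcast : ((c * m + r.length + 1 : Nat) : Int) + 1
          = (((c + 1) * m + ([] : List (Option Int)).length + 1 : Nat) : Int) := by
        obtain rfl : m = r.length + 1 := hfl.symm
        simp only [List.length_nil]
        push_cast
        ring
      rw [hcast, ih (g ++ [r ++ [v]]) [] (c + 1) hm0]
      simp only [List.nil_append]
      have hL : r ++ v :: vs = (r ++ [v]) ++ vs := by simp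
      rw [hL]
      have hlen : ((r ++ [v]) ++ vs).length = m + vs.length := by simp; omega
      have hR : ((r ++ [v]) ++ vs).take (((r ++ [v]) ++ vs).length - ((r ++ [v]) ++ vs).length % m)
          = (r ++ [v]) ++ vs.take (vs.length - vs.length % m) := by
        rw [hlen, Nat.add_mod_left]
        have h1 : m + vs.length - vs.length % m
            = (r ++ [v]).length + (vs.length - vs.length % m) := by
          simp only [List.length_append, List.length_cons, List.length_nil]
          have := Nat.mod_le vs.length m
          omega
        rw [h1, List.take_append]
        congr 1
        · exact List.take_of_length_le (Nat.le_add_right _ _)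
        · congr 1
          omega
      rw [hR, chunkRows_cons m hm0 ((r ++ [v]) ++ vs.take (vs.length - vs.length % m))
        (by simp)]
      have htake : ((r ++ [v]) ++ vs.take (vs.length - vs.length % m)).take m = r ++ [v] := by
        rw [List.take_append_of_le_length (by simp; omega)]
        apply List.take_of_length_le
        simp; omega
      have hdrop : ((r ++ [v]) ++ vs.take (vs.length - vs.length % m)).drop m
          = vs.take (vs.length - vs.length % m) := by
        rw [List.drop_append_of_le_length (by simp; omega)]
        rw [List.drop_eq_nil_of_le (by simp; omega)]
        simp
      rw [htake, hdrop]
      simp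
    · -- no flush: the value joins the partial row
      have hcond : ¬ (PySem.Int.mod ((c * m + r.length + 1 : Nat) : Int) size = 0) := by
        rw [flush_iff size m c r.length hm (by omega)]; exact hfl
      rw [if_neg hcond]
      have hcast : ((c * m + r.length + 1 : Nat) : Int) + 1
          = ((c * m + (r ++ [v]).length + 1 : Nat) : Int) := by
        simp only [List.length_append, List.length_cons, List.length_nil]
        push_cast
        ring
      rw [hcast, ih g (r ++ [v]) c (by simp; omega)]
      simp

-- Python's a % b is ≤ 0 for a negative divisor
theorem fmod_nonpos_of_neg (a b : Int) (hb : b < 0) : a.fmod b ≤ 0 := by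
  rw [Int.fmod_eq_emod]
  have h0 : 0 ≤ a % b := Int.emod_nonneg a (by omega)
  have h1 : a % b < -b := by
    have := Int.emod_lt_of_pos a (b := -b) (by omega)
    rwa [Int.emod_neg] at this
  split_ifs with h2
  · rcases h2 with h2 | h2
    · omega
    · simp [Int.emod_eq_zero_of_dvd h2]
  · omega

-- B's row comprehension over range(0, q*m, m), characterized as chunks
theorem sliceChunk (m : Nat) (hm0 : 0 < m) :
    ∀ (q : Nat) (vals : List (Option Int)), q * m ≤ vals.length →
    (List.range q).map (fun k => (vals.drop (m * k)).take m)
      = chunkRows m (vals.take (q * m)) := by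
  intro q
  induction q with
  | zero => intro vals _; simp [chunkRows]
  | succ q ih =>
    intro vals h
    rw [Nat.succ_mul] at h ⊢
    rw [List.range_succ_eq_map, List.map_cons, List.map_map]
    have htake_ne : vals.take (q * m + m) ≠ [] := by
      intro h0
      have := congrArg List.length h0
      simp only [List.length_take, List.length_nil] at this
      omega
    rw [chunkRows_cons m hm0 _ htake_ne]
    congr 1
    · simp only [Nat.mul_zero, List.drop_zero]
      rw [List.take_take]
      congr 1
      omega
    · have hdt : (vals.take (q * m + m)).drop m = (vals.drop m).take (q * m) := by
        rw [List.drop_take]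
        congr 1
        omega
      rw [hdt, ← ih (vals.drop m) (by simp only [List.length_drop]; omega)]
      apply List.map_congr_left
      intro k _
      simp only [Function.comp, List.drop_drop]
      congr 1
      congr 1
      simp only [Nat.succ_eq_add_one]
      ring

-- ===== VERDICT (by name: the statements are the Claim_ definitions above) =====
set_option maxHeartbeats 1000000 in
theorem convert_1d_to_2d_spec : Claim_unchanged_convert_1d_to_2d := by
  intro string size hdom hpre hnd
  obtain ⟨hsz, -⟩ := hpre
  unfold convert_1d_to_2d convert_1d_to_2d_alt
  dsimp only
  have hm0 : 0 < size.natAbs := Int.natAbs_pos.mpr hsz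
  set m : Nat := size.natAbs with hmdef
  set toks : List String := pvToksPre string with htoks
  set vals : List (Option Int) := toks.map PySem.Int.ofStr? with hvals
  have hlen : vals.length = toks.length := by rw [hvals]; simp
  -- A's side via the loop characterization
  have key := loopA size m rfl hm0 vals [] [] 0 hm0
  rw [List.foldl_map] at key
  norm_num at key
  rw [key]
  rcases lt_trichotomy size 0 with hneg | hz | hpos
  · -- size < 0 outside D_: fewer than m tokens, both sides are []
    have hlt : vals.length < m := by
      unfold D_convert_1d_to_2d at hnd
      push_neg at hnd
      have := hnd hneg
      rw [← htoks] at this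
      omega
    have hmod : vals.length % m = vals.length := Nat.mod_eq_of_lt hlt
    rw [hmod]
    simp only [Nat.sub_self, List.take_zero]
    have hstop : (0 : Int) ≤ (vals.length : Int) - PySem.Int.mod (vals.length : Int) size := by
      have := fmod_nonpos_of_neg (vals.length : Int) size hneg
      unfold PySem.Int.mod
      omega
    have hrange : PySem.List.pyRange 0 ((vals.length : Int) - PySem.Int.mod (vals.length : Int) size) size = [] := by
      unfold PySem.List.pyRange
      rw [if_neg (by omega)]
      rw [if_neg (by omega), if_neg (by omega)]
      simp
    rw [hrange]
    simp [chunkRows]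
  · exact absurd hz hsz
  · -- size > 0: both sides are the chunks of the multiple-of-m prefix
    have hms : (m : Int) = size := by
      rw [hmdef, Int.natAbs_of_nonneg hpos.le]
    set q : Nat := vals.length / m with hq
    have hqm : vals.length - vals.length % m = q * m := by
      have := Nat.div_add_mod vals.length m
      have h1 : q * m = m * (vals.length / m) := by rw [hq]; ring
      omega
    have hmod : PySem.Int.mod (vals.length : Int) size = ((vals.length % m : Nat) : Int) := by
      rw [← hms]
      exact_mod_cast PySem.Int.mod_natCast vals.length m
    have hstop : (vals.length : Int) - PySem.Int.mod (vals.length : Int) size = ((q * m : Nat) : Int) := by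
      rw [hmod, ← hqm]
      have := Nat.mod_le vals.length m
      push_cast
      omega
    rw [hstop, hqm]
    -- evaluate the range: it is [0, m, 2m, …, (q-1)m]
    have hcount : PySem.List.pyRange 0 ((q * m : Nat) : Int) size
        = (List.range q).map (fun (k : Nat) => size * (↑k : Int)) := by
      unfold PySem.List.pyRange
      rw [if_neg (by omega), if_pos hpos]
      have hc : (if (0 : Int) < ((q * m : Nat) : Int)
          then ((((q * m : Nat) : Int) - 0 + size - 1) / size).toNat else 0) = q := by
        by_cases hq0 : 0 < q * m
        · rw [if_pos (by exact_mod_cast hq0)]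
          have he : ((q * m : Nat) : Int) - 0 + size - 1 = (((m - 1) + m * q : Nat) : Int) := by
            rw [← hms]; push_cast
            have hmq : (m : Int) * (q : Int) = (q : Int) * (m : Int) := by ring
            omega
          rw [he, ← hms]
          rw [← Int.natCast_div]
          rw [Nat.add_mul_div_left _ _ hm0, Nat.div_eq_of_lt (by omega)]
          simp
        · rw [if_neg (by exact_mod_cast hq0)]
          rcases Nat.mul_eq_zero.mp (by omega : q * m = 0) with h | h
          · omega
          · omega
      rw [hc]
      dsimp only
      apply List.map_congr_left
      intro k _
      ring
    rw [hcount, ← sliceChunk m hm0 q vals (by have := Nat.div_add_mod vals.length m; omega)]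
    simp only [List.map_map]
    apply List.map_congr_left
    intro k hk
    simp only [Function.comp]
    refine congrArg _ ?_
    have h1 : size * (↑k : Int) = ((m * k : Nat) : Int) := by rw [← hms]; push_cast; ring
    rw [h1]
    have h2 : ((m * k : Nat) : Int) + size = ((m * k + m : Nat) : Int) := by
      rw [← hms]; push_cast; ring
    rw [h2, PySem.List.slice_natCast]
    have h3 : m * k + m - m * k = m := by omega
    rw [h3]

theorem convert_1d_to_2d_changed : Claim_changed_convert_1d_to_2d := by
  unfold Claim_changed_convert_1d_to_2d; decide

theorem convert_1d_to_2d_tight : Claim_exact_convert_1d_to_2d := by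
  intro string size hdom hpre hd
  obtain ⟨hsz, -⟩ := hpre
  obtain ⟨hneg, hlen0⟩ := hd
  unfold convert_1d_to_2d convert_1d_to_2d_alt
  dsimp only
  have hm0 : 0 < size.natAbs := Int.natAbs_pos.mpr hsz
  set m : Nat := size.natAbs with hmdef
  set toks : List String := pvToksPre string with htoks
  set vals : List (Option Int) := toks.map PySem.Int.ofStr? with hvals
  have hlen : vals.length = toks.length := by rw [hvals]; simp
  have hmn : m ≤ vals.length := by omega
  -- B is [] for a negative size
  have hstop : (0 : Int) ≤ (vals.length : Int) - PySem.Int.mod (vals.length : Int) size := by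
    have := fmod_nonpos_of_neg (vals.length : Int) size hneg
    unfold PySem.Int.mod
    omega
  have hrange : PySem.List.pyRange 0 ((vals.length : Int) - PySem.Int.mod (vals.length : Int) size) size = [] := by
    unfold PySem.List.pyRange
    rw [if_neg (by omega)]
    rw [if_neg (by omega), if_neg (by omega)]
    simp
  -- A is nonempty: the first row flushes
  have key := loopA size m rfl hm0 vals [] [] 0 hm0
  rw [List.foldl_map] at key
  norm_num at key
  rw [key, hrange]
  have hpos : 0 < vals.length - vals.length % m := by
    have := Nat.mod_lt vals.length hm0
    omega
  have hne : vals.take (vals.length - vals.length % m) ≠ [] := by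
    intro h0
    have := congrArg List.length h0
    simp only [List.length_take, List.length_nil] at this
    omega
  rw [chunkRows_cons m hm0 _ hne]
  simp
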